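-- pv_equiv track=rewrite | github.com/Qianhongbo/ECE143-Programming-for-Data-Analysis | get_power_of3/main.py | get_power_of3
-- ===== SOURCE A (Python) =====
-- import itertools
--
-- def get_power_of3(value):
--     """
--     Given a set of weights {1,3,9,27}, write a function to construct any number between 1 and 40.
--     In other words, using the set above and the addition and subtraction operations,
--     construct any integer between 1 and 40 without re-using elements.
--     For example, 4 = 1+1+1+1 is not acceptable.
--
--     :param value: A number between 1 to 40
--     :return: A 4-element list of the decomposition
--     """
--     assert value >=1
--     assert value <=40
--     temp = {}
--     for i, j in enumerate(itertools.product([-1, 0, 1], repeat=4)):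
--         if i > 40:
--             temp[i - 40] = list(reversed(j))
--     return temp[value]
-- ===== SOURCE B (Python) =====
-- def get_power_of3(value):
--     assert value >= 1
--     assert value <= 40
--     n = value
--     digits = []
--     for _ in range(4):
--         r = n % 3
--         if r == 2:
--             digits.append(-1)
--             n = n // 3 + 1
--         else:
--             digits.append(r)
--             n = n // 3
--     return digits
-- ===== Notes on version B (the rewrite author's own statement) =====
-- stated objective: simpler
-- what changed: B computes the balanced-ternary digits of value directly with a short mod/div loop instead of enumerating every itertools.product tuple into a dict and then indexing that dict.
import Mathlib
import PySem

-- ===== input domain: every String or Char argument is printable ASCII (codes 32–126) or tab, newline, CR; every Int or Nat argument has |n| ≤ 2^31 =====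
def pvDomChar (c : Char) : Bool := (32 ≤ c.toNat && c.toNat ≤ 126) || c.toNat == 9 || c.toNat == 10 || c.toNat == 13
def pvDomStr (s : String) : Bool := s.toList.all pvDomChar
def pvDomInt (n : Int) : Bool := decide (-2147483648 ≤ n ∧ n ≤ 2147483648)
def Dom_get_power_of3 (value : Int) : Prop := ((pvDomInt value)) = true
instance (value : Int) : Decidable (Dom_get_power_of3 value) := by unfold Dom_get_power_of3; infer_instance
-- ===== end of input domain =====

set_option maxRecDepth 4000


-- B replaces A's itertools.product lookup table with a direct balanced-ternary digit loop (simpler, constant-factor cheaper).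

-- ===== PORT A =====
-- itertools.product([-1,0,1], repeat=4): lexicographic, first coordinate varies slowest
def pvProd3_4 : List (List Int) :=
  ([-1, 0, 1] : List Int).flatMap (fun a =>
    ([-1, 0, 1] : List Int).flatMap (fun b =>
      ([-1, 0, 1] : List Int).flatMap (fun c =>
        ([-1, 0, 1] : List Int).map (fun d => [a, b, c, d]))))

def get_power_of3 (value : Int) : List Int :=
  let temp : PySem.Dict Int (List Int) :=
    (PySem.List.enumerate pvProd3_4).foldl
      (fun t p => if p.1 > 40 then t.insert (p.1 - 40) p.2.reverse else t)
      PySem.Dict.empty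
  -- temp[value]: KeyError (none) excluded by Pre_
  (temp.get? value).getD []

-- ===== PORT B =====
def get_power_of3_alt (value : Int) : List Int :=
  let step : (Int × List Int) → Nat → (Int × List Int) := fun st _ =>
    let r := PySem.Int.mod st.1 3
    if r = 2 then (PySem.Int.floordiv st.1 3 + 1, st.2 ++ [-1])
    else (PySem.Int.floordiv st.1 3, st.2 ++ [r])
  ((List.range 4).foldl step (value, [])).2

-- ===== PRECONDITION & SPEC =====
-- Pre_: the two asserts in A and B — AssertionError outside 1..40
def Pre_get_power_of3 (value : Int) : Prop := 1 ≤ value ∧ value ≤ 40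
instance (value : Int) : Decidable (Pre_get_power_of3 value) := by unfold Pre_get_power_of3; infer_instance
def pvWitness_get_power_of3 : Int := (7)

def Spec_get_power_of3 (value : Int) (out : List Int) : Prop := out = get_power_of3_alt value
instance (value : Int) (out : List Int) : Decidable (Spec_get_power_of3 value out) := by unfold Spec_get_power_of3; infer_instance

-- ===== CLAIM (what is proved, stated in full; the proofs are below) =====
def Claim_equal_get_power_of3 : Prop := ∀ (value : Int), Dom_get_power_of3 value → Pre_get_power_of3 value → Spec_get_power_of3 value (get_power_of3 value)

-- ===== LEMMAS AND PROOFS =====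

-- ===== VERDICT (by name: the statement is the Claim_ definition above) =====
theorem get_power_of3_spec : Claim_equal_get_power_of3 := by
  intro value _ hpre
  obtain ⟨h1, h2⟩ := hpre
  unfold Spec_get_power_of3
  interval_cases value <;> decide
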